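-- pv_equiv track=rewrite | github.com/AshesOfPhoenix/PR19KKZDBMPBPGS | raziskavadirektorji.py | vrnislovarje
-- ===== SOURCE A (Python) =====
-- def vrnislovarje(slova):
--     prvih20={}
--     stevec=0
--     zadnjih20={}
--     for key in slova.keys():
--         stevec+=1
--         if len(slova)-stevec<=5:
--             zadnjih20[key]=slova[key]
--     stevec=0
--     for key in slova.keys():
--         stevec+=1
--         if stevec<=5:
--             prvih20[key]=slova[key]
--     return prvih20,zadnjih20
-- ===== SOURCE B (Python) =====
-- def vrnislovarje(slova):
--     # Note: A's condition `len(slova)-stevec<=5` keeps the last SIX entries; reproduced here as items[-6:].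
--     items = list(slova.items())
--     return dict(items[:5]), dict(items[-6:])
-- ===== Notes on version B (the rewrite author's own statement) =====
-- stated objective: simpler
-- what changed: B materializes the dict's items once and slices (items[:5], items[-6:]) instead of A's two counter-driven passes over the keys with len-based conditions and repeated key lookups.
import Mathlib
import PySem

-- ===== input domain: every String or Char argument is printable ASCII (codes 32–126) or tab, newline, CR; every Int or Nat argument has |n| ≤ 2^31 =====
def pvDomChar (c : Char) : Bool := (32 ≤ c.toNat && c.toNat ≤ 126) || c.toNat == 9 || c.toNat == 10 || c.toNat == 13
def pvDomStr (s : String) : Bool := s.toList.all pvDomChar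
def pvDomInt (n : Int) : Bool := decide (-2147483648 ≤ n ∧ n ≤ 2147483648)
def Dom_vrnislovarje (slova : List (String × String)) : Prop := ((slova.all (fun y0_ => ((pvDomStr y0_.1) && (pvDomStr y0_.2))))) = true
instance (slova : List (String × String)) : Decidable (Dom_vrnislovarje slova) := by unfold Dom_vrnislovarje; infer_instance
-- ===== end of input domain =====

-- B replaces A's two counter-driven key passes by one slicing of the item list; note A's
-- `len(slova)-stevec<=5` keeps the last SIX entries, which B reproduces as items[-6:].

-- ===== PORT A =====
def vrnislovarje (slova : List (String × String)) : (List (String × String)) × (List (String × String)) :=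
  let d := PySem.Dict.ofList slova
  let z := (PySem.Dict.keys d).foldl
      (fun (st : Int × PySem.Dict String String) key =>
        let stevec := st.1 + 1
        if PySem.Dict.size d - stevec ≤ 5 then
          (stevec, PySem.Dict.insert st.2 key (PySem.Dict.getD d key ""))
        else (stevec, st.2))
      (0, PySem.Dict.empty)
  let p := (PySem.Dict.keys d).foldl
      (fun (st : Int × PySem.Dict String String) key =>
        let stevec := st.1 + 1
        if stevec ≤ 5 then
          (stevec, PySem.Dict.insert st.2 key (PySem.Dict.getD d key ""))
        else (stevec, st.2))
      (0, PySem.Dict.empty)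
  (PySem.Dict.items p.2, PySem.Dict.items z.2)

-- ===== PORT B =====
def vrnislovarje_alt (slova : List (String × String)) : (List (String × String)) × (List (String × String)) :=
  let items := PySem.Dict.items (PySem.Dict.ofList slova)
  ((PySem.Dict.ofList (PySem.List.slice items none (some 5))).items,
   (PySem.Dict.ofList (PySem.List.slice items (some (-6)) none)).items)

-- ===== PRECONDITION & SPEC =====
def Spec_vrnislovarje (slova : List (String × String)) (out : (List (String × String)) × (List (String × String))) : Prop := out = vrnislovarje_alt slova
instance (slova : List (String × String)) (out : (List (String × String)) × (List (String × String))) : Decidable (Spec_vrnislovarje slova out) := by unfold Spec_vrnislovarje; infer_instance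

-- ===== CLAIM (what is proved, stated in full; the proofs are below) =====
def Claim_equal_vrnislovarje : Prop := ∀ (slova : List (String × String)), Dom_vrnislovarje slova → Spec_vrnislovarje slova (vrnislovarje slova)

-- ===== LEMMAS AND PROOFS =====

-- dict(ys) on a list with distinct keys is ys itself, as an items list
theorem items_ofList_of_nodup (ys : List (String × String)) (h : (ys.map Prod.fst).Nodup) :
    (PySem.Dict.ofList ys).items = ys := by
  have := PySem.Dict.items_foldl_insert_fresh ys Prod.fst Prod.snd
      (PySem.Dict.empty : PySem.Dict String String)
      (by intro a _; simp [PySem.Dict.contains_empty]) h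
  simpa [PySem.Dict.ofList, PySem.Dict.update] using this

-- A's first-five loop: the counter-guarded fold inserts exactly the first (5 - c) keys
theorem loop_take (v : String → String) :
    ∀ (ks : List String) (c : Int) (d : PySem.Dict String String),
    (d.keys ++ ks).Nodup →
    ((ks.foldl
        (fun (st : Int × PySem.Dict String String) key =>
          let stevec := st.1 + 1
          if stevec ≤ 5 then (stevec, PySem.Dict.insert st.2 key (v key)) else (stevec, st.2))
        (c, d)).2).items
      = d.items ++ (ks.take ((5 - c).toNat)).map (fun k => (k, v k)) := by
  intro ks
  induction ks with
  | nil => intro c d _; simp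
  | cons k ks ih =>
    intro c d hnd
    have hkmem : k ∉ d.keys := by
      intro hm
      exact (List.disjoint_of_nodup_append hnd) hm (List.mem_cons_self)
    have hk : d.contains k = false := by
      rw [PySem.Dict.contains_eq_decide_mem_keys]; simpa using hkmem
    have htail : (d.keys ++ ks).Nodup :=
      hnd.sublist ((List.sublist_cons_self k ks).append_left d.keys)
    by_cases h5 : c + 1 ≤ 5
    · have hrec := ih (c + 1) (d.insert k (v k)) (by
        rw [PySem.Dict.keys_insert_of_not_contains d (v k) hk]
        simpa [List.append_assoc] using hnd)
      simp only [List.foldl_cons, if_pos h5] at *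
      rw [hrec, PySem.Dict.items_insert_of_not_contains d (v k) hk]
      have : (5 - c).toNat = (5 - (c + 1)).toNat + 1 := by omega
      simp [this]
    · simp only [List.foldl_cons, if_neg h5]
      rw [ih (c + 1) d htail]
      have h0 : (5 - c).toNat = 0 := by omega
      have h1 : (5 - (c + 1)).toNat = 0 := by omega
      simp [h0, h1]

-- A's last-six loop: the counter-guarded fold inserts exactly the keys after the first (n - 6 - c)
theorem loop_drop (v : String → String) (n : Int) :
    ∀ (ks : List String) (c : Int) (d : PySem.Dict String String),
    (d.keys ++ ks).Nodup →
    ((ks.foldl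
        (fun (st : Int × PySem.Dict String String) key =>
          let stevec := st.1 + 1
          if n - stevec ≤ 5 then (stevec, PySem.Dict.insert st.2 key (v key)) else (stevec, st.2))
        (c, d)).2).items
      = d.items ++ (ks.drop ((n - 6 - c).toNat)).map (fun k => (k, v k)) := by
  intro ks
  induction ks with
  | nil => intro c d _; simp
  | cons k ks ih =>
    intro c d hnd
    have hkmem : k ∉ d.keys := by
      intro hm
      exact (List.disjoint_of_nodup_append hnd) hm (List.mem_cons_self)
    have hk : d.contains k = false := by
      rw [PySem.Dict.contains_eq_decide_mem_keys]; simpa using hkmem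
    have htail : (d.keys ++ ks).Nodup :=
      hnd.sublist ((List.sublist_cons_self k ks).append_left d.keys)
    by_cases h5 : n - (c + 1) ≤ 5
    · have hrec := ih (c + 1) (d.insert k (v k)) (by
        rw [PySem.Dict.keys_insert_of_not_contains d (v k) hk]
        simpa [List.append_assoc] using hnd)
      simp only [List.foldl_cons, if_pos h5] at *
      rw [hrec, PySem.Dict.items_insert_of_not_contains d (v k) hk]
      have h0 : (n - 6 - c).toNat = 0 := by omega
      have h1 : (n - 6 - (c + 1)).toNat = 0 := by omega
      simp [h0, h1]
    · simp only [List.foldl_cons, if_neg h5]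
      rw [ih (c + 1) d htail]
      have : (n - 6 - c).toNat = (n - 6 - (c + 1)).toNat + 1 := by omega
      simp [this]

-- ===== VERDICT (by name: the statement is the Claim_ definition above) =====
theorem vrnislovarje_spec : Claim_equal_vrnislovarje := by
  intro slova _
  unfold Spec_vrnislovarje vrnislovarje vrnislovarje_alt
  set d := PySem.Dict.ofList slova with hd
  have hnd : d.keys.Nodup := PySem.Dict.nodup_keys_ofList slova
  have hkeys : d.keys = d.items.map Prod.fst := rfl
  have hitems : d.items = d.keys.map (fun k => (k, d.getD k "")) :=
    PySem.Dict.items_eq_map_keys d hnd ""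
  have hempty : ((PySem.Dict.empty : PySem.Dict String String).keys ++ d.keys).Nodup := by
    simpa [PySem.Dict.keys_empty] using hnd
  have hsize : PySem.Dict.size d = (d.keys.length : Int) := by
    simp [PySem.Dict.size, hkeys]
  -- the two loops of A
  have hA1 := loop_take (fun k => d.getD k "") d.keys 0 PySem.Dict.empty hempty
  have hA2 := loop_drop (fun k => d.getD k "") (PySem.Dict.size d) d.keys 0 PySem.Dict.empty hempty
  -- the two slices of B
  have hs1 : PySem.List.slice d.items none (some 5) = d.items.take 5 := by
    have := PySem.List.slice_to_natCast d.items 5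
    simpa using this
  have hs2 : PySem.List.slice d.items (some (-6)) none = d.items.drop (d.items.length - 6) :=
    PySem.List.slice_from_neg_ofNat d.items 6 (by omega)
  have hlen : d.items.length = d.keys.length := by
    simp [hkeys]
  -- nodup keys of the sliced item lists
  have hnd1 : ((d.items.take 5).map Prod.fst).Nodup := by
    rw [List.map_take, ← hkeys]; exact hnd.sublist (List.take_sublist _ _)
  have hnd2 : ((d.items.drop (d.items.length - 6)).map Prod.fst).Nodup := by
    rw [List.map_drop, ← hkeys]; exact hnd.sublist (List.drop_sublist _ _)
  simp only [hs1, hs2, items_ofList_of_nodup _ hnd1, items_ofList_of_nodup _ hnd2]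
  have hE : (PySem.Dict.empty : PySem.Dict String String).items = [] := rfl
  have hsz : d.size = d.keys.length := by exact_mod_cast hsize
  refine Prod.ext ?_ ?_
  · simp only [hA1, hE, List.nil_append]
    have h5 : ((5 : Int) - 0).toNat = 5 := rfl
    rw [h5, List.map_take, ← hitems]
  · simp only [hA2, hE, List.nil_append]
    rw [List.map_drop, ← hitems]
    congr 1
    omega
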